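-- pv_equiv track=rewrite | github.com/BWSI-RACECAR/code-clash-09-Peter4300 | licenseplate.py | licensePlate
-- ===== SOURCE A (Python) =====
-- def licensePlate(str):
--     # type str: string
--     # return: int
--
--     # TODO: Write code below to return an int with the solution to the prompt
--     alphabet = 26
--     numbers = 10
--     result = 1
--     c = 0
--     for x in range(0,3):
--         if str[x]!=".":
--             c+=1
--     alphabet -= c
--
--     for x in range(0,3):
--         if str[x] == ".":
--             result *= alphabet
--             alphabet -= 1
--
--     k=0
--     for x in range(3,7):
--         if str[x]!=".":
--             k+=1
--     numbers -= k
--     for x in range(3,7):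
--         if str[x]==".":
--             result *= numbers
--             numbers -= 1
--     return result
-- ===== SOURCE B (Python) =====
-- # B: count the wildcard dots in each zone, then one table lookup per zone
-- # (precomputed falling-factorial products) instead of A's four interleaved loops.
-- _LETTER = [1, 24, 600, 15600]        # perm(23+d, d) for d dots among 3 letter slots
-- _DIGIT = [1, 7, 56, 504, 5040]       # perm(6+d, d) for d dots among 4 digit slots
--
-- def licensePlate(str):
--     d1 = sum(1 for x in range(0, 3) if str[x] == ".")
--     d2 = sum(1 for x in range(3, 7) if str[x] == ".")
--     return _LETTER[d1] * _DIGIT[d2]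
-- ===== Notes on version B (the rewrite author's own statement) =====
-- stated objective: simpler
-- what changed: A's four loops (two interleaved multiply-and-decrement passes per zone) are replaced by counting the dots in each zone and multiplying two precomputed falling-factorial table entries.
import Mathlib
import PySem

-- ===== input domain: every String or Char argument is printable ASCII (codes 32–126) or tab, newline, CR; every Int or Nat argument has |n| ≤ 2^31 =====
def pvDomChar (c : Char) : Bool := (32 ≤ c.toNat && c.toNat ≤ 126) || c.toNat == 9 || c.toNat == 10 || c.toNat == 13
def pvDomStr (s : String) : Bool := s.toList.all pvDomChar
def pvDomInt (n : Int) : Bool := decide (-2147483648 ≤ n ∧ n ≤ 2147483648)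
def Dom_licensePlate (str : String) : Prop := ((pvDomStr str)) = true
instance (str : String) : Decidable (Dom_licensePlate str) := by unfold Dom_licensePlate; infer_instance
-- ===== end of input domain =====

-- B replaces A's four interleaved loops by two dot counts and one table lookup per zone (objective: simpler).

-- ===== PORT A =====
-- A reads str[0..6]; within Pre_ (length ≥ 7) every access is in range, so getD's default is never used.
def licensePlateCore (l : List Char) : Int :=
  let c : Int := (List.range 3).foldl (fun c x => if l.getD x '.' ≠ '.' then c + 1 else c) 0
  let alphabet : Int := 26 - c
  let p1 := (List.range 3).foldl
    (fun (p : Int × Int) x => if l.getD x ' ' = '.' then (p.1 * p.2, p.2 - 1) else p)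
    (1, alphabet)
  let k : Int := [3, 4, 5, 6].foldl (fun k x => if l.getD x '.' ≠ '.' then k + 1 else k) 0
  let numbers : Int := 10 - k
  let p2 := [3, 4, 5, 6].foldl
    (fun (p : Int × Int) x => if l.getD x ' ' = '.' then (p.1 * p.2, p.2 - 1) else p)
    (p1.1, numbers)
  p2.1

def licensePlate (str : String) : Int := licensePlateCore str.toList

-- ===== PORT B =====
def letterTable : List Int := [1, 24, 600, 15600]
def digitTable : List Int := [1, 7, 56, 504, 5040]

def licensePlateAltCore (l : List Char) : Int :=
  let d1 := ((List.range 3).filter (fun x => l.getD x ' ' = '.')).length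
  let d2 := (([3, 4, 5, 6] : List Nat).filter (fun x => l.getD x ' ' = '.')).length
  letterTable.getD d1 0 * digitTable.getD d2 0

def licensePlate_alt (str : String) : Int := licensePlateAltCore str.toList

-- ===== PRECONDITION & SPEC =====
-- Pre_ excludes strings of length < 7, on which the Python A raises IndexError at str[x] (B raises there too).
def Pre_licensePlate (str : String) : Prop := 7 ≤ str.toList.length
instance (str : String) : Decidable (Pre_licensePlate str) := by unfold Pre_licensePlate; infer_instance
def pvWitness_licensePlate : String := "A.C12.4"

def Spec_licensePlate (str : String) (out : Int) : Prop := out = licensePlate_alt str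
instance (str : String) (out : Int) : Decidable (Spec_licensePlate str out) := by unfold Spec_licensePlate; infer_instance

-- ===== CLAIM (what is proved, stated in full; the proofs are below) =====
def Claim_equal_licensePlate : Prop := ∀ (str : String), Dom_licensePlate str → Pre_licensePlate str → Spec_licensePlate str (licensePlate str)

-- ===== LEMMAS AND PROOFS =====
-- A's second-zone loop starts from the first zone's result; this factors it out.
theorem foldl_mul_split (l : List Char) (xs : List Nat) (r n : Int) :
    xs.foldl (fun (p : Int × Int) x => if l.getD x ' ' = '.' then (p.1 * p.2, p.2 - 1) else p) (r, n)
    = (r * (xs.foldl (fun (p : Int × Int) x => if l.getD x ' ' = '.' then (p.1 * p.2, p.2 - 1) else p) (1, n)).1,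
       (xs.foldl (fun (p : Int × Int) x => if l.getD x ' ' = '.' then (p.1 * p.2, p.2 - 1) else p) (1, n)).2) := by
  induction xs generalizing r n with
  | nil => simp
  | cons x xs ih =>
    simp only [List.foldl_cons]
    by_cases h : l.getD x ' ' = '.'
    · simp only [if_pos h]
      rw [ih (r * n) (n - 1), ih (1 * n) (n - 1)]
      simp [mul_assoc]
    · simp only [if_neg h]
      exact ih r n

theorem letterZone (a b c : Char) (rest : List Char) :
    ((List.range 3).foldl
      (fun (p : Int × Int) x => if (a :: b :: c :: rest).getD x ' ' = '.' then (p.1 * p.2, p.2 - 1) else p)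
      (1, 26 - (List.range 3).foldl (fun k x => if (a :: b :: c :: rest).getD x '.' ≠ '.' then k + 1 else k) (0 : Int))).1
    = letterTable.getD (((List.range 3).filter (fun x => (a :: b :: c :: rest).getD x ' ' = '.')).length) 0 := by
  by_cases h1 : a = '.' <;> by_cases h2 : b = '.' <;> by_cases h3 : c = '.' <;>
    simp [List.range_succ, letterTable, h1, h2, h3]

theorem digitZone (d e f g : Char) (a b c : Char) (rest : List Char) :
    (([3, 4, 5, 6] : List Nat).foldl
      (fun (p : Int × Int) x => if (a :: b :: c :: d :: e :: f :: g :: rest).getD x ' ' = '.' then (p.1 * p.2, p.2 - 1) else p)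
      (1, 10 - ([3, 4, 5, 6] : List Nat).foldl (fun k x => if (a :: b :: c :: d :: e :: f :: g :: rest).getD x '.' ≠ '.' then k + 1 else k) (0 : Int))).1
    = digitTable.getD ((([3, 4, 5, 6] : List Nat).filter (fun x => (a :: b :: c :: d :: e :: f :: g :: rest).getD x ' ' = '.')).length) 0 := by
  by_cases h4 : d = '.' <;> by_cases h5 : e = '.' <;> by_cases h6 : f = '.' <;> by_cases h7 : g = '.' <;>
    simp [digitTable, h4, h5, h6, h7]

theorem licensePlate_core (a b c d e f g : Char) (rest : List Char) :
    licensePlateCore (a :: b :: c :: d :: e :: f :: g :: rest)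
    = licensePlateAltCore (a :: b :: c :: d :: e :: f :: g :: rest) := by
  simp only [licensePlateCore, licensePlateAltCore]
  rw [foldl_mul_split, letterZone a b c (d :: e :: f :: g :: rest), digitZone d e f g a b c rest]

-- ===== VERDICT (by name: the statement is the Claim_ definition above) =====
theorem licensePlate_spec : Claim_equal_licensePlate := by
  intro str _ hpre
  unfold Spec_licensePlate licensePlate licensePlate_alt
  unfold Pre_licensePlate at hpre
  match h : str.toList, hpre with
  | a :: b :: c :: d :: e :: f :: g :: rest, _ =>
    exact licensePlate_core a b c d e f g rest
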